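-- pv_equiv track=rewrite | github.com/IsaacG/Advent-of-Code | codyssi/problem04.py | solve
-- ===== SOURCE A (Python) =====
-- import collections
-- import itertools
--
-- def solve(part: int, data: str) -> int:
--     """Solve the puzzle."""
--     lines = data.splitlines()
--     paths = collections.defaultdict(set)
--     for line in lines:
--         a, _, b = line.split()
--         paths[a].add(b)
--         paths[b].add(a)
--     if part == 1:
--         return len(paths)
--     if part == 2:
--         locations = {"STT"}
--         for _ in range(3):
--             locations.update(j for i in locations.copy() for j in paths[i])
--         return len(locations)
--
--     locations = {"STT"}
--     seen = locations.copy()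
--     total = 0
--     for i in itertools.count():
--         total += i * len(locations)
--         locations = {j for i in locations for j in paths[i] if j not in seen}
--         if not locations:
--             return total
--         seen.update(locations)
--     raise RuntimeError("Not reachable")
-- ===== SOURCE B (Python) =====
-- def solve(part: int, data: str) -> int:
--     """Solve the puzzle."""
--     paths = {}
--     for line in data.splitlines():
--         a, _, b = line.split()
--         paths.setdefault(a, set()).add(b)
--         paths.setdefault(b, set()).add(a)
--     if part == 1:
--         return len(paths)
--     # One BFS from "STT" recording every reachable node's distance; parts 2
--     # and 3 are both read off the same distance table.
--     dist = {"STT": 0}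
--     frontier = ["STT"]
--     d = 0
--     while frontier:
--         d += 1
--         nxt = []
--         for u in frontier:
--             for v in paths.get(u, ()):
--                 if v not in dist:
--                     dist[v] = d
--                     nxt.append(v)
--         frontier = nxt
--     if part == 2:
--         return sum(1 for x in dist.values() if x <= 3)
--     return sum(dist.values())
-- ===== Notes on version B (the rewrite author's own statement) =====
-- stated objective: alternative
-- what changed: Replaces A's two separate frontier expansions (a 3-round ball growth for part 2 and a level-counting loop with a seen-set for part 3) by one BFS from STT that records every node's distance in a table, answering part 2 as the count of distances <= 3 and part 3 as the sum of all distances.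
import Mathlib
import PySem

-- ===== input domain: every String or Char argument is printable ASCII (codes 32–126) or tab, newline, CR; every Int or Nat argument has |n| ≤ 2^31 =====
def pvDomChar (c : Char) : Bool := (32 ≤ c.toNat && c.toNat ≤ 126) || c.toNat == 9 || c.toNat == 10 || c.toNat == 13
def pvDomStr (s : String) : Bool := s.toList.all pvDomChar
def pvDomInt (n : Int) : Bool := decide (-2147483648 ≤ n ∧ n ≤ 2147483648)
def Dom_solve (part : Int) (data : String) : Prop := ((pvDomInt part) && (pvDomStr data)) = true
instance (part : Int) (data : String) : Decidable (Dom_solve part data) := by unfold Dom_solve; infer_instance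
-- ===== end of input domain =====

-- B replaces A's two separate frontier expansions by one BFS that records each node's
-- distance from "STT" in a table and reads both part-2 and part-3 answers off that table
-- (objective: alternative decomposition, same asymptotic cost).

-- ===== PORT A =====
-- Both Pythons build the identical adjacency dict (A via defaultdict(set).add, B via
-- setdefault(…, set()).add — the same keys, values and insertion order), so the parsing
-- helper is shared.  A line that does not split into exactly 3 words raises ValueError
-- in Python (excluded by Pre_solve); the port skips it.
def pvAddLine (d : PySem.Dict String (List String)) (line : String) :
    PySem.Dict String (List String) :=
  match PySem.Str.split₀ line with
  | [a, _, b] =>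
      PySem.Dict.modify (PySem.Dict.modify d a [] (fun s => PySem.Set.add s b)) b []
        (fun s => PySem.Set.add s a)
  | _ => d

def pvBuildPaths (lines : List String) : PySem.Dict String (List String) :=
  lines.foldl pvAddLine PySem.Dict.empty

-- paths[i] on a defaultdict returns the stored set, or an empty set for an absent key
-- (the defaultdict also inserts that empty set, which no later lookup can observe).
def pvNbrs (paths : PySem.Dict String (List String)) (u : String) : List String :=
  PySem.Dict.getD paths u []

-- the part-3 'for i in itertools.count()' loop; the Python loop always terminates
-- (seen grows inside a finite node set), fuel = size+2 exceeds the iterations needed,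
-- so the fuel-0 branch is unreachable (proved below via pvLoop3_eq).
def pvLoop3 (paths : PySem.Dict String (List String)) :
    Nat → Int → PySem.Set String → PySem.Set String → Int → Int
  | 0, _, _, _, total => total
  | fuel+1, i, locations, seen, total =>
    let total := total + i * (locations.length : Int)
    let nxt : PySem.Set String :=
      PySem.Set.ofList ((locations.flatMap (pvNbrs paths)).filter
        (fun j => !(PySem.Set.contains seen j)))
    if nxt.isEmpty then total
    else pvLoop3 paths fuel (i+1) nxt (PySem.Set.update seen nxt) total

def solve (part : Int) (data : String) : Int :=
  let lines := PySem.Str.splitlines data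
  let paths := pvBuildPaths lines
  if part = 1 then ((PySem.Dict.keys paths).length : Int)
  else if part = 2 then
    let locations : PySem.Set String :=
      (PySem.List.pyRange 0 3 1).foldl (fun loc _ =>
        PySem.Set.update loc (loc.flatMap (pvNbrs paths))) (PySem.Set.ofList ["STT"])
    (locations.length : Int)
  else
    pvLoop3 paths (PySem.Dict.size paths + 2) 0
      (PySem.Set.ofList ["STT"]) (PySem.Set.ofList ["STT"]) 0

-- ===== PORT B =====
-- one BFS recording distances; same fuel remark as for pvLoop3 (proved via pvBfs_eq).
def pvBfs (paths : PySem.Dict String (List String)) :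
    Nat → Int → List String → PySem.Dict String Int → PySem.Dict String Int
  | 0, _, _, dist => dist
  | fuel+1, d, frontier, dist =>
    if frontier.isEmpty then dist
    else
      let d := d + 1
      let st := frontier.foldl (fun (st : PySem.Dict String Int × List String) u =>
        (pvNbrs paths u).foldl (fun st v =>
          if PySem.Dict.contains st.1 v then st
          else (PySem.Dict.insert st.1 v d, st.2 ++ [v])) st) (dist, [])
      pvBfs paths fuel d st.2 st.1

def solve_alt (part : Int) (data : String) : Int :=
  let paths := pvBuildPaths (PySem.Str.splitlines data)
  if part = 1 then ((PySem.Dict.keys paths).length : Int)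
  else
    let dist := pvBfs paths (PySem.Dict.size paths + 2) 0 ["STT"]
      (PySem.Dict.insert PySem.Dict.empty "STT" 0)
    if part = 2 then
      (((PySem.Dict.values dist).filter (fun x => decide (x ≤ 3))).length : Int)
    else (PySem.Dict.values dist).sum

-- ===== PRECONDITION & SPEC =====
-- Pre_solve admits exactly the inputs where A returns: every line must split into
-- exactly 3 whitespace-separated words, otherwise 'a, _, b = line.split()' raises ValueError.
def Pre_solve (part : Int) (data : String) : Prop :=
  ∀ line ∈ PySem.Str.splitlines data, (PySem.Str.split₀ line).length = 3
instance (part : Int) (data : String) : Decidable (Pre_solve part data) := by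
  unfold Pre_solve; infer_instance
def pvWitness_solve : Int × String := (3, "STT <-> AAA\nAAA <-> BBB")

def Spec_solve (part : Int) (data : String) (out : Int) : Prop := out = solve_alt part data
instance (part : Int) (data : String) (out : Int) : Decidable (Spec_solve part data out) := by
  unfold Spec_solve; infer_instance

-- ===== CLAIM (what is proved, stated in full; the proofs are below) =====
def Claim_equal_solve : Prop := ∀ (part : Int) (data : String), Dom_solve part data → Pre_solve part data → Spec_solve part data (solve part data)


-- ===== LEMMAS AND PROOFS =====

-- ordered first-occurrence filter: the elements of xs not in seen, first occurrences only
def pvDedupF : List String → List String → List String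
  | [], _ => []
  | x :: xs, seen => if x ∈ seen then pvDedupF xs seen else x :: pvDedupF xs (x :: seen)

-- BFS levels: (frontier at distance k, all nodes at distance ≤ k), both in discovery order
def pvFS (P : PySem.Dict String (List String)) : Nat → List String × List String
  | 0 => (["STT"], ["STT"])
  | k+1 => (pvDedupF ((pvFS P k).1.flatMap (pvNbrs P)) (pvFS P k).2,
            (pvFS P k).2 ++ pvDedupF ((pvFS P k).1.flatMap (pvNbrs P)) (pvFS P k).2)

def pvF (P : PySem.Dict String (List String)) (k : Nat) : List String := (pvFS P k).1
def pvS (P : PySem.Dict String (List String)) (k : Nat) : List String := (pvFS P k).2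

def pvTail (P : PySem.Dict String (List String)) (k n : Nat) : Int :=
  ((List.range n).map (fun t => ((k+t : Nat) : Int) * ((pvF P (k+t)).length : Int))).sum

def pvD (P : PySem.Dict String (List String)) : Nat → PySem.Dict String Int
  | 0 => PySem.Dict.insert PySem.Dict.empty "STT" 0
  | k+1 => (pvF P (k+1)).foldl (fun d' v => d'.insert v ((k+1 : Nat) : Int)) (pvD P k)

theorem pvF_succ (P : PySem.Dict String (List String)) (k : Nat) :
    pvF P (k+1) = pvDedupF ((pvF P k).flatMap (pvNbrs P)) (pvS P k) := rfl

theorem pvS_succ (P : PySem.Dict String (List String)) (k : Nat) :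
    pvS P (k+1) = pvS P k ++ pvF P (k+1) := rfl

theorem mem_pvDedupF (x : String) : ∀ (xs seen : List String),
    x ∈ pvDedupF xs seen ↔ x ∈ xs ∧ x ∉ seen := by
  intro xs
  induction xs with
  | nil => intro seen; simp [pvDedupF]
  | cons a xs ih =>
    intro seen
    by_cases ha : a ∈ seen
    · rw [pvDedupF, if_pos ha, ih]
      constructor
      · rintro ⟨h1, h2⟩; exact ⟨List.mem_cons_of_mem _ h1, h2⟩
      · rintro ⟨h1, h2⟩
        rcases List.mem_cons.1 h1 with rfl | h1
        · exact absurd ha h2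
        · exact ⟨h1, h2⟩
    · rw [pvDedupF, if_neg ha]
      constructor
      · intro hx
        rcases List.mem_cons.1 hx with rfl | hx
        · exact ⟨List.mem_cons_self, ha⟩
        · obtain ⟨h1, h2⟩ := (ih (a :: seen)).1 hx
          exact ⟨List.mem_cons_of_mem _ h1, fun hs => h2 (List.mem_cons_of_mem _ hs)⟩
      · rintro ⟨h1, h2⟩
        by_cases hxa : x = a
        · subst hxa; exact List.mem_cons_self
        · rcases List.mem_cons.1 h1 with rfl | h1
          · exact absurd rfl hxa
          · exact List.mem_cons_of_mem _
              ((ih _).2 ⟨h1, fun hs => (List.mem_cons.1 hs).elim hxa h2⟩)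

theorem pvDedupF_congr : ∀ (xs s t : List String), (∀ y, y ∈ s ↔ y ∈ t) →
    pvDedupF xs s = pvDedupF xs t := by
  intro xs
  induction xs with
  | nil => intro s t h; rfl
  | cons a xs ih =>
    intro s t h
    by_cases ha : a ∈ s
    · rw [pvDedupF, pvDedupF, if_pos ha, if_pos ((h a).1 ha), ih s t h]
    · rw [pvDedupF, pvDedupF, if_neg ha, if_neg (fun hx => ha ((h a).2 hx))]
      exact congrArg _ (ih _ _ (by intro y; simp [h y]))

theorem nodup_pvDedupF : ∀ (xs seen : List String), (pvDedupF xs seen).Nodup := by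
  intro xs
  induction xs with
  | nil => intro seen; simp [pvDedupF]
  | cons a xs ih =>
    intro seen
    by_cases ha : a ∈ seen
    · rw [pvDedupF, if_pos ha]; exact ih seen
    · rw [pvDedupF, if_neg ha]
      refine List.nodup_cons.2 ⟨fun hx => ?_, ih _⟩
      exact ((mem_pvDedupF a xs (a :: seen)).1 hx).2 (List.mem_cons_self)

theorem pvDedupF_append_of_subset : ∀ (as bs seen : List String), (∀ x ∈ as, x ∈ seen) →
    pvDedupF (as ++ bs) seen = pvDedupF bs seen := by
  intro as
  induction as with
  | nil => intro bs seen h; rfl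
  | cons a as ih =>
    intro bs seen h
    rw [List.cons_append, pvDedupF, if_pos (h a List.mem_cons_self)]
    exact ih bs seen (fun x hx => h x (List.mem_cons.2 (Or.inr hx)))

theorem foldl_add_filter (seen : List String) : ∀ (xs acc : List String),
    List.foldl PySem.Set.add acc (xs.filter (fun j => !(PySem.Set.contains seen j)))
      = acc ++ pvDedupF xs (seen ++ acc) := by
  intro xs
  induction xs with
  | nil => intro acc; simp [pvDedupF]
  | cons a xs ih =>
    intro acc
    by_cases ha : a ∈ seen
    · rw [List.filter_cons, if_neg (by simp [ha]),
        pvDedupF, if_pos (List.mem_append.2 (Or.inl ha)), ih acc]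
    · rw [List.filter_cons, if_pos (by simp [ha])]
      by_cases hacc : a ∈ acc
      · rw [List.foldl_cons, PySem.Set.add_of_mem hacc, ih acc,
          pvDedupF, if_pos (List.mem_append.2 (Or.inr hacc))]
      · rw [List.foldl_cons, PySem.Set.add_of_not_mem hacc, ih (acc ++ [a]),
          pvDedupF, if_neg (by simp [ha, hacc])]
        have hc : pvDedupF xs (seen ++ (acc ++ [a])) = pvDedupF xs (a :: (seen ++ acc)) :=
          pvDedupF_congr xs _ _ (by intro y; simp; tauto)
        simp [hc]

theorem ofList_filter_eq_dedupF (xs seen : List String) :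
    PySem.Set.ofList (xs.filter (fun j => !(PySem.Set.contains seen j))) = pvDedupF xs seen := by
  rw [PySem.Set.ofList_eq_foldl, foldl_add_filter seen xs []]
  simp

theorem update_eq_dedupF : ∀ (xs s : List String),
    PySem.Set.update s xs = s ++ pvDedupF xs s := by
  intro xs
  induction xs with
  | nil => intro s; simp [PySem.Set.update_nil, pvDedupF]
  | cons a xs ih =>
    intro s
    rw [PySem.Set.update_cons]
    by_cases ha : a ∈ s
    · rw [PySem.Set.add_of_mem ha, ih s, pvDedupF, if_pos ha]
    · rw [PySem.Set.add_of_not_mem ha, ih (s ++ [a]), pvDedupF, if_neg ha]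
      have hc : pvDedupF xs (s ++ [a]) = pvDedupF xs (a :: s) :=
        pvDedupF_congr xs _ _ (by intro y; simp; tauto)
      simp [hc]

theorem nodup_pvF (P : PySem.Dict String (List String)) (k : Nat) : (pvF P k).Nodup := by
  cases k with
  | zero => simp [pvF, pvFS]
  | succ k => rw [pvF_succ]; exact nodup_pvDedupF _ _

theorem pvF_disj (P : PySem.Dict String (List String)) (k : Nat) :
    ∀ x ∈ pvF P (k+1), x ∉ pvS P k := by
  intro x hx
  rw [pvF_succ] at hx
  exact ((mem_pvDedupF x _ _).1 hx).2

theorem nodup_pvS (P : PySem.Dict String (List String)) (k : Nat) : (pvS P k).Nodup := by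
  induction k with
  | zero => simp [pvS, pvFS]
  | succ k ih =>
    rw [pvS_succ]
    exact ih.append (nodup_pvF P (k+1)) (fun x hx hx2 => pvF_disj P k x hx2 hx)

theorem mem_pvS_mono (P : PySem.Dict String (List String)) {k n : Nat} (h : k ≤ n) {x : String}
    (hx : x ∈ pvS P k) : x ∈ pvS P n := by
  induction n with
  | zero => rwa [Nat.le_zero.1 h] at hx
  | succ n ih =>
    rcases Nat.le_succ_iff.1 h with h' | rfl
    · rw [pvS_succ]; exact List.mem_append.2 (Or.inl (ih h'))
    · exact hx

theorem exists_level (P : PySem.Dict String (List String)) : ∀ (k : Nat) (x : String),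
    x ∈ pvS P k → ∃ j, j ≤ k ∧ x ∈ pvF P j := by
  intro k
  induction k with
  | zero => intro x hx; exact ⟨0, le_refl _, hx⟩
  | succ k ih =>
    intro x hx
    rw [pvS_succ] at hx
    rcases List.mem_append.1 hx with hx | hx
    · obtain ⟨j, hj, hxj⟩ := ih x hx
      exact ⟨j, Nat.le_succ_of_le hj, hxj⟩
    · exact ⟨k+1, le_refl _, hx⟩

theorem nbr_step (P : PySem.Dict String (List String)) {k : Nat} {u v : String}
    (hu : u ∈ pvF P k) (hv : v ∈ pvNbrs P u) : v ∈ pvS P (k+1) := by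
  by_cases hs : v ∈ pvS P k
  · exact mem_pvS_mono P (Nat.le_succ k) hs
  · rw [pvS_succ]
    refine List.mem_append.2 (Or.inr ?_)
    rw [pvF_succ]
    exact (mem_pvDedupF v _ _).2 ⟨List.mem_flatMap.2 ⟨u, hu, hv⟩, hs⟩

theorem nbr_S (P : PySem.Dict String (List String)) {k : Nat} {u v : String}
    (hu : u ∈ pvS P k) (hv : v ∈ pvNbrs P u) : v ∈ pvS P (k+1) := by
  obtain ⟨j, hj, hu'⟩ := exists_level P k u hu
  exact mem_pvS_mono P (Nat.succ_le_succ hj) (nbr_step P hu' hv)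

theorem pvF_empty_succ (P : PySem.Dict String (List String)) {k : Nat} (h : pvF P k = []) :
    pvF P (k+1) = [] := by
  rw [pvF_succ, h]
  rfl

theorem pvF_empty_mono (P : PySem.Dict String (List String)) {k n : Nat} (h : pvF P k = [])
    (hkn : k ≤ n) : pvF P n = [] := by
  induction n with
  | zero => rwa [Nat.le_zero.1 hkn] at h
  | succ n ih =>
    rcases Nat.le_succ_iff.1 hkn with h' | rfl
    · exact pvF_empty_succ P (ih h')
    · exact h

theorem pvS_subset_univ (P : PySem.Dict String (List String))
    (hcl : ∀ u v, v ∈ pvNbrs P u → v ∈ PySem.Dict.keys P) (k : Nat) :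
    ∀ x ∈ pvS P k, x ∈ ("STT" :: PySem.Dict.keys P) := by
  induction k with
  | zero => intro x hx; simp [pvS, pvFS] at hx; simp [hx]
  | succ k ih =>
    intro x hx
    rw [pvS_succ] at hx
    rcases List.mem_append.1 hx with hx | hx
    · exact ih x hx
    · rw [pvF_succ] at hx
      obtain ⟨u, _, hv⟩ := List.mem_flatMap.1 ((mem_pvDedupF x _ _).1 hx).1
      exact List.mem_cons_of_mem _ (hcl u x hv)

theorem pvS_length_le (P : PySem.Dict String (List String))
    (hcl : ∀ u v, v ∈ pvNbrs P u → v ∈ PySem.Dict.keys P) (k : Nat) :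
    (pvS P k).length ≤ (PySem.Dict.keys P).length + 1 := by
  have h1 : (pvS P k).toFinset.card = (pvS P k).length :=
    List.toFinset_card_of_nodup (nodup_pvS P k)
  have h2 : (pvS P k).toFinset ⊆ ("STT" :: PySem.Dict.keys P).toFinset := by
    intro x hx
    exact List.mem_toFinset.2 (pvS_subset_univ P hcl k x (List.mem_toFinset.1 hx))
  have h3 := Finset.card_le_card h2
  have h4 := List.toFinset_card_le ("STT" :: PySem.Dict.keys P)
  simp only [List.length_cons] at h4
  omega

theorem pvS_length_lower (P : PySem.Dict String (List String)) :
    ∀ (k : Nat), pvF P k ≠ [] → k + 1 ≤ (pvS P k).length := by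
  intro k
  induction k with
  | zero => intro _; simp [pvS, pvFS]
  | succ k ih =>
    intro h
    have hk : pvF P k ≠ [] := fun he => h (pvF_empty_succ P he)
    have h1 := ih hk
    have h2 : 1 ≤ (pvF P (k+1)).length := by
      cases he : pvF P (k+1) with
      | nil => exact absurd he h
      | cons a l => simp
    rw [pvS_succ, List.length_append]
    omega

theorem pvF_vanish (P : PySem.Dict String (List String))
    (hcl : ∀ u v, v ∈ pvNbrs P u → v ∈ PySem.Dict.keys P) {k : Nat}
    (hk : (PySem.Dict.keys P).length + 1 ≤ k) : pvF P k = [] := by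
  set m := (PySem.Dict.keys P).length + 1 with hm
  have hbase : pvF P m = [] := by
    by_contra h
    have h1 := pvS_length_lower P m h
    have h2 := pvS_length_le P hcl m
    omega
  exact pvF_empty_mono P hbase hk

theorem pvAddEdge_closed (d : PySem.Dict String (List String)) (a b : String)
    (h : ∀ u v, v ∈ PySem.Dict.getD d u [] → v ∈ PySem.Dict.keys d) :
    ∀ u v, v ∈ PySem.Dict.getD
        (PySem.Dict.modify (PySem.Dict.modify d a [] (fun s => PySem.Set.add s b)) b []
          (fun s => PySem.Set.add s a)) u [] →
      v ∈ PySem.Dict.keys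
        (PySem.Dict.modify (PySem.Dict.modify d a [] (fun s => PySem.Set.add s b)) b []
          (fun s => PySem.Set.add s a)) := by
  intro u v hv
  have hkeys : ∀ x : String, x ∈ PySem.Dict.keys
      (PySem.Dict.modify (PySem.Dict.modify d a [] (fun s => PySem.Set.add s b)) b []
        (fun s => PySem.Set.add s a)) ↔ x = b ∨ x = a ∨ x ∈ PySem.Dict.keys d := by
    intro x
    rw [PySem.Dict.keys_modify, PySem.Dict.mem_keys_insert, PySem.Dict.keys_modify,
      PySem.Dict.mem_keys_insert]
  rw [hkeys v]
  rw [PySem.Dict.getD_modify] at hv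
  by_cases hub : u = b
  · rw [if_pos hub] at hv
    rcases (PySem.Set.mem_add _ _ _).1 hv with hv | rfl
    · rw [PySem.Dict.getD_modify] at hv
      by_cases hba : b = a
      · rw [if_pos hba] at hv
        rcases (PySem.Set.mem_add _ _ _).1 hv with hv | rfl
        · exact Or.inr (Or.inr (h a v hv))
        · exact Or.inl rfl
      · rw [if_neg hba] at hv
        exact Or.inr (Or.inr (h b v hv))
    · exact Or.inr (Or.inl rfl)
  · rw [if_neg hub, PySem.Dict.getD_modify] at hv
    by_cases hua : u = a
    · rw [if_pos hua] at hv
      rcases (PySem.Set.mem_add _ _ _).1 hv with hv | rfl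
      · exact Or.inr (Or.inr (h a v hv))
      · exact Or.inl rfl
    · rw [if_neg hua] at hv
      exact Or.inr (Or.inr (h u v hv))

theorem pvBuildPaths_closed (lines : List String) :
    ∀ u v, v ∈ pvNbrs (pvBuildPaths lines) u → v ∈ PySem.Dict.keys (pvBuildPaths lines) := by
  suffices h : ∀ (ls : List String) (d : PySem.Dict String (List String)),
      (∀ u v, v ∈ PySem.Dict.getD d u [] → v ∈ PySem.Dict.keys d) →
      ∀ u v, v ∈ PySem.Dict.getD (ls.foldl pvAddLine d) u [] →
        v ∈ PySem.Dict.keys (ls.foldl pvAddLine d) by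
    intro u v hv
    exact h lines PySem.Dict.empty
      (by intro u v hv; simp [PySem.Dict.getD_empty] at hv) u v hv
  intro ls
  induction ls with
  | nil => intro d h; exact h
  | cons line ls ih =>
    intro d h
    rw [List.foldl_cons]
    refine ih _ ?_
    rcases hsp : PySem.Str.split₀ line with _ | ⟨a, _ | ⟨x, _ | ⟨b, _ | ⟨y, rest⟩⟩⟩⟩ <;>
      simp only [pvAddLine, hsp]
    · exact h
    · exact h
    · exact h
    · exact pvAddEdge_closed d a b h
    · exact h

theorem size_eq_keys_length (P : PySem.Dict String (List String)) :
    PySem.Dict.size P = (PySem.Dict.keys P).length := by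
  simp [PySem.Dict.size, PySem.Dict.keys]

theorem pvTail_succ (P : PySem.Dict String (List String)) (k n : Nat) :
    pvTail P k (n+1) = (k : Int) * ((pvF P k).length : Int) + pvTail P (k+1) n := by
  unfold pvTail
  rw [List.range_succ_eq_map, List.map_cons, List.sum_cons, List.map_map]
  simp only [Nat.add_zero]
  congr 2
  refine List.map_congr_left (fun t _ => ?_)
  have h1 : k + Nat.succ t = (k + 1) + t := by omega
  simp only [Function.comp_apply, h1]

theorem pvTail_snoc (P : PySem.Dict String (List String)) (n : Nat) :
    pvTail P 0 (n+1) = pvTail P 0 n + (n : Int) * ((pvF P n).length : Int) := by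
  unfold pvTail
  rw [List.range_succ, List.map_append, List.sum_append]
  simp

theorem pvTail_zero_of_empty (P : PySem.Dict String (List String)) {k : Nat}
    (h : pvF P k = []) (n : Nat) : pvTail P k n = 0 := by
  unfold pvTail
  refine List.sum_eq_zero (fun x hx => ?_)
  obtain ⟨t, _, rfl⟩ := List.mem_map.1 hx
  rw [pvF_empty_mono P h (Nat.le_add_right k t)]
  simp

-- A's part-3 loop computes the level-weighted sum
theorem pvLoop3_eq (P : PySem.Dict String (List String)) : ∀ (fuel k : Nat) (total : Int),
    pvF P (k + fuel) = [] → pvF P k ≠ [] →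
    pvLoop3 P fuel (k : Int) (pvF P k) (pvS P k) total = total + pvTail P k fuel := by
  intro fuel
  induction fuel with
  | zero =>
    intro k total h hne
    exact absurd (by simpa using h) hne
  | succ fuel ih =>
    intro k total h hne
    simp only [pvLoop3]
    have hnxt : PySem.Set.ofList (((pvF P k).flatMap (pvNbrs P)).filter
        (fun j => !(PySem.Set.contains (pvS P k) j))) = pvF P (k+1) := by
      rw [ofList_filter_eq_dedupF, pvF_succ]
    rw [hnxt]
    by_cases he : pvF P (k+1) = []
    · rw [if_pos (by simp [he])]
      rw [pvTail_succ, pvTail_zero_of_empty P he]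
      ring
    · rw [if_neg (by simp [List.isEmpty_iff, he])]
      have hupd : PySem.Set.update (pvS P k) (pvF P (k+1)) = pvS P (k+1) := by
        rw [PySem.Set.update_eq_append_of_disjoint _ _ (nodup_pvF P (k+1)) (pvF_disj P k),
          ← pvS_succ]
      rw [hupd]
      have hcast : (k : Int) + 1 = ((k+1 : Nat) : Int) := by push_cast; ring
      rw [hcast]
      have h' : pvF P ((k+1) + fuel) = [] := by
        rw [show (k+1)+fuel = k + (fuel+1) by omega]; exact h
      rw [ih (k+1) _ h' he, pvTail_succ]
      ring

theorem keys_pvD (P : PySem.Dict String (List String)) :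
    ∀ k, PySem.Dict.keys (pvD P k) = pvS P k := by
  intro k
  induction k with
  | zero => rfl
  | succ k ih =>
    have hfresh : ∀ a ∈ pvF P (k+1), (pvD P k).contains a = false := by
      intro a ha
      rw [PySem.Dict.contains_eq_decide_mem_keys, ih]
      exact decide_eq_false (pvF_disj P k a ha)
    have hnd : ((pvF P (k+1)).map (fun a => a)).Nodup := by simpa using nodup_pvF P (k+1)
    have hitems := PySem.Dict.items_foldl_insert_fresh (pvF P (k+1)) (fun a => a)
        (fun _ => ((k+1 : Nat) : Int)) (pvD P k) hfresh hnd
    simp only [pvD, PySem.Dict.keys, hitems, List.map_append, List.map_map]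
    rw [pvS_succ, ← ih]
    simp [PySem.Dict.keys, Function.comp_def]

theorem values_pvD_succ (P : PySem.Dict String (List String)) (k : Nat) :
    PySem.Dict.values (pvD P (k+1))
      = PySem.Dict.values (pvD P k) ++ (pvF P (k+1)).map (fun _ => ((k+1 : Nat) : Int)) := by
  have hfresh : ∀ a ∈ pvF P (k+1), (pvD P k).contains a = false := by
    intro a ha
    rw [PySem.Dict.contains_eq_decide_mem_keys, keys_pvD]
    exact decide_eq_false (pvF_disj P k a ha)
  have hnd : ((pvF P (k+1)).map (fun a => a)).Nodup := by simpa using nodup_pvF P (k+1)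
  have hitems := PySem.Dict.items_foldl_insert_fresh (pvF P (k+1)) (fun a => a)
      (fun _ => ((k+1 : Nat) : Int)) (pvD P k) hfresh hnd
  simp only [pvD, PySem.Dict.values, hitems, List.map_append, List.map_map]
  simp [Function.comp_def, List.map_const']

theorem pvBfs_inner (P : PySem.Dict String (List String)) (dlab : Int) :
    ∀ (seq : List String) (dist : PySem.Dict String Int) (acc : List String),
    List.foldl (fun (st : PySem.Dict String Int × List String) v =>
        if PySem.Dict.contains st.1 v then st
        else (PySem.Dict.insert st.1 v dlab, st.2 ++ [v])) (dist, acc) seq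
      = ((pvDedupF seq (PySem.Dict.keys dist)).foldl (fun d' v => d'.insert v dlab) dist,
         acc ++ pvDedupF seq (PySem.Dict.keys dist)) := by
  intro seq
  induction seq with
  | nil => intro dist acc; simp [pvDedupF]
  | cons v seq ih =>
    intro dist acc
    rw [List.foldl_cons]
    by_cases hc : v ∈ PySem.Dict.keys dist
    · have hct : PySem.Dict.contains dist v = true := (PySem.Dict.contains_iff_mem_keys dist v).2 hc
      rw [if_pos hct, pvDedupF, if_pos hc]
      exact ih dist acc
    · have hcf : PySem.Dict.contains dist v = false := by
        rw [PySem.Dict.contains_eq_decide_mem_keys]; exact decide_eq_false hc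
      rw [if_neg (by simp [hcf])]
      rw [ih (dist.insert v dlab) (acc ++ [v])]
      have hkeys : PySem.Dict.keys (dist.insert v dlab) = PySem.Dict.keys dist ++ [v] :=
        PySem.Dict.keys_insert_of_not_contains dist dlab hcf
      have hcongr : pvDedupF seq (PySem.Dict.keys dist ++ [v])
          = pvDedupF seq (v :: PySem.Dict.keys dist) :=
        pvDedupF_congr _ _ _ (by intro y; simp; tauto)
      rw [hkeys, hcongr, pvDedupF, if_neg hc]
      simp

theorem pvD_stable (P : PySem.Dict String (List String)) {k : Nat} (h : pvF P k = []) :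
    ∀ {n : Nat}, k ≤ n → pvD P n = pvD P k := by
  intro n hn
  induction n with
  | zero => rw [Nat.le_zero.1 hn]
  | succ n ih =>
    rcases Nat.le_succ_iff.1 hn with h' | rfl
    · have he : pvF P (n+1) = [] := pvF_empty_mono P h (by omega)
      simp only [pvD, he, List.foldl_nil]
      exact ih h'
    · rfl

-- B's BFS loop computes the distance table level by level
theorem pvBfs_eq (P : PySem.Dict String (List String)) : ∀ (fuel k : Nat),
    pvF P (k + fuel) = [] →
    pvBfs P fuel (k : Int) (pvF P k) (pvD P k) = pvD P (k + fuel) := by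
  intro fuel
  induction fuel with
  | zero => intro k _; rfl
  | succ fuel ih =>
    intro k h
    simp only [pvBfs]
    by_cases he : pvF P k = []
    · rw [if_pos (by simp [he])]
      exact (pvD_stable P he (by omega)).symm
    · rw [if_neg (by simp [List.isEmpty_iff, he])]
      rw [← List.foldl_flatMap, pvBfs_inner P ((k : Int)+1) _ (pvD P k) []]
      have hkeys : PySem.Dict.keys (pvD P k) = pvS P k := keys_pvD P k
      have hded : pvDedupF ((pvF P k).flatMap (pvNbrs P)) (pvS P k) = pvF P (k+1) :=
        (pvF_succ P k).symm
      have hcast : (k : Int) + 1 = ((k+1 : Nat) : Int) := by push_cast; ring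
      rw [hkeys, hded, List.nil_append, hcast]
      have hD : (pvF P (k+1)).foldl (fun d' v => d'.insert v ((k+1 : Nat) : Int)) (pvD P k)
          = pvD P (k+1) := rfl
      rw [hD]
      have h' : pvF P ((k+1) + fuel) = [] := by
        rw [show (k+1)+fuel = k + (fuel+1) by omega]; exact h
      rw [ih (k+1) h']
      congr 1
      omega

theorem sum_values_pvD (P : PySem.Dict String (List String)) :
    ∀ n, ((pvD P n).values).sum = pvTail P 0 (n+1) := by
  intro n
  induction n with
  | zero =>
    have h0 : PySem.Dict.values (pvD P 0) = [0] := rfl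
    rw [h0]
    simp [pvTail, List.range_succ]
  | succ n ih =>
    rw [values_pvD_succ, List.sum_append, ih, PySem.List.sum_map_const_int]
    conv_rhs => rw [pvTail_snoc P (n+1)]
    ring

theorem cnt_values_pvD (P : PySem.Dict String (List String)) :
    ∀ n, (((pvD P n).values).filter (fun x => decide (x ≤ 3))).length
      = ((List.range (n+1)).map (fun t => if t ≤ 3 then (pvF P t).length else 0)).sum := by
  intro n
  induction n with
  | zero =>
    have h0 : PySem.Dict.values (pvD P 0) = [0] := rfl
    rw [h0]
    simp [List.range_succ, pvF, pvFS]
  | succ n ih =>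
    rw [values_pvD_succ, List.filter_append, List.length_append, ih]
    conv_rhs => rw [List.range_succ, List.map_append, List.sum_append]
    have hrep : (List.filter (fun x => decide (x ≤ 3))
        ((pvF P (n+1)).map (fun _ => ((n+1 : Nat) : Int)))).length
        = if n + 1 ≤ 3 then (pvF P (n+1)).length else 0 := by
      by_cases h3' : n + 1 ≤ 3
      · rw [if_pos h3']
        rw [List.filter_eq_self.2 (by
          intro x hx
          obtain ⟨a, _, rfl⟩ := List.mem_map.1 hx
          simp only [decide_eq_true_eq]
          exact_mod_cast h3')]
        rw [List.length_map]
      · rw [if_neg h3']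
        rw [List.filter_eq_nil_iff.2 (by
          intro x hx
          obtain ⟨a, _, rfl⟩ := List.mem_map.1 hx
          simp only [decide_eq_true_eq]
          push_cast
          omega)]
        rfl
    rw [hrep]
    simp

theorem len_pvS (P : PySem.Dict String (List String)) :
    ∀ k, (pvS P k).length = ((List.range (k+1)).map (fun t => (pvF P t).length)).sum := by
  intro k
  induction k with
  | zero => simp [pvS, pvFS, List.range_succ, pvF]
  | succ k ih =>
    rw [pvS_succ, List.length_append, ih]
    conv_rhs => rw [List.range_succ, List.map_append, List.sum_append]
    simp

theorem sum_range_extend (g : Nat → Nat) : ∀ (L n : Nat), n ≤ L → (∀ t, n ≤ t → g t = 0) →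
    ((List.range L).map g).sum = ((List.range n).map g).sum := by
  intro L n hnL hz
  induction L, hnL using Nat.le_induction with
  | base => rfl
  | succ L hL ih =>
    rw [List.range_succ, List.map_append, List.sum_append, ih]
    simp [hz L hL]

theorem dedupF_S (P : PySem.Dict String (List String)) :
    ∀ k, pvDedupF ((pvS P k).flatMap (pvNbrs P)) (pvS P k) = pvF P (k+1) := by
  intro k
  cases k with
  | zero => rfl
  | succ k =>
    have h1 : ∀ x ∈ (pvS P k).flatMap (pvNbrs P), x ∈ pvS P (k+1) := by
      intro x hx
      obtain ⟨u, hu, hv⟩ := List.mem_flatMap.1 hx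
      exact nbr_S P hu hv
    conv_lhs => rw [show (pvS P (k+1)).flatMap (pvNbrs P)
      = (pvS P k).flatMap (pvNbrs P) ++ (pvF P (k+1)).flatMap (pvNbrs P) from by
        rw [pvS_succ, List.flatMap_append]]
    rw [pvDedupF_append_of_subset _ _ _ h1, ← pvF_succ]

theorem ball_step (P : PySem.Dict String (List String)) (k : Nat) :
    PySem.Set.update (pvS P k) ((pvS P k).flatMap (pvNbrs P)) = pvS P (k+1) := by
  rw [update_eq_dedupF, dedupF_S, ← pvS_succ]

theorem cnt_eq_lenS3 (P : PySem.Dict String (List String))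
    (hcl : ∀ u v, v ∈ pvNbrs P u → v ∈ PySem.Dict.keys P) (n : Nat)
    (hn : (PySem.Dict.keys P).length ≤ n) :
    ((List.range (n+1)).map (fun t => if t ≤ 3 then (pvF P t).length else 0)).sum
      = (pvS P 3).length := by
  rw [len_pvS]
  have hz : ∀ t, n + 1 ≤ t → (if t ≤ 3 then (pvF P t).length else 0) = 0 := by
    intro t ht
    by_cases h3 : t ≤ 3
    · rw [if_pos h3, pvF_vanish P hcl (by omega)]
      rfl
    · rw [if_neg h3]
  have hext := sum_range_extend (fun t => if t ≤ 3 then (pvF P t).length else 0)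
    (n+5) (n+1) (by omega) hz
  rw [← hext, show n + 5 = 4 + (n+1) by omega, List.range_add, List.map_append,
    List.sum_append]
  have hz2 : (((List.range (n+1)).map (fun j => 4 + j)).map
      (fun t => if t ≤ 3 then (pvF P t).length else 0)).sum = 0 := by
    refine List.sum_eq_zero (fun x hx => ?_)
    obtain ⟨t, ht, rfl⟩ := List.mem_map.1 hx
    obtain ⟨j, _, rfl⟩ := List.mem_map.1 ht
    rw [if_neg (by omega)]
  rw [hz2]
  simp [List.range_succ]

theorem solve_main (part : Int) (data : String) : solve part data = solve_alt part data := by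
  simp only [solve, solve_alt]
  set P := pvBuildPaths (PySem.Str.splitlines data) with hP
  have hcl := pvBuildPaths_closed (PySem.Str.splitlines data)
  rw [← hP] at hcl
  by_cases h1 : part = 1
  · rw [if_pos h1, if_pos h1]
  · rw [if_neg h1, if_neg h1]
    have hvanish : ∀ {m : Nat}, (PySem.Dict.keys P).length + 1 ≤ m → pvF P m = [] :=
      fun {m} hm => pvF_vanish P hcl hm
    have hsz : PySem.Dict.size P = (PySem.Dict.keys P).length := size_eq_keys_length P
    have hbfs : pvBfs P (PySem.Dict.size P + 2) 0 ["STT"]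
        (PySem.Dict.insert PySem.Dict.empty "STT" 0) = pvD P (PySem.Dict.size P + 2) := by
      have h := pvBfs_eq P (PySem.Dict.size P + 2) 0 (hvanish (by omega))
      simpa [show pvF P 0 = ["STT"] from rfl, show pvD P 0
        = PySem.Dict.insert PySem.Dict.empty "STT" 0 from rfl] using h
    rw [hbfs]
    by_cases h2 : part = 2
    · rw [if_pos h2, if_pos h2]
      have hr : PySem.List.pyRange 0 3 1 = [0, 1, 2] := by decide
      rw [hr]
      have hA : List.foldl (fun loc _ => PySem.Set.update loc (loc.flatMap (pvNbrs P)))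
          (PySem.Set.ofList ["STT"]) ([0, 1, 2] : List Int) = pvS P 3 := by
        have h0 : PySem.Set.ofList ["STT"] = pvS P 0 := rfl
        rw [h0]
        simp only [List.foldl_cons, List.foldl_nil]
        rw [ball_step P 0, ball_step P 1, ball_step P 2]
      rw [hA]
      have hB : (((pvD P (PySem.Dict.size P + 2)).values).filter
          (fun x => decide (x ≤ 3))).length = (pvS P 3).length := by
        rw [cnt_values_pvD]
        exact cnt_eq_lenS3 P hcl (PySem.Dict.size P + 2) (by omega)
      rw [hB]
    · rw [if_neg h2, if_neg h2]
      have hA3 : pvLoop3 P (PySem.Dict.size P + 2) 0 (PySem.Set.ofList ["STT"])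
          (PySem.Set.ofList ["STT"]) 0 = pvTail P 0 (PySem.Dict.size P + 2) := by
        have h := pvLoop3_eq P (PySem.Dict.size P + 2) 0 0 (hvanish (by omega))
          (by simp [pvF, pvFS])
        simpa [show pvF P 0 = PySem.Set.ofList ["STT"] from rfl,
          show pvS P 0 = PySem.Set.ofList ["STT"] from rfl] using h
      rw [hA3, sum_values_pvD]
      rw [pvTail_snoc P (PySem.Dict.size P + 2), hvanish (by omega)]
      simp

-- ===== VERDICT (by name: the statement is the Claim_ definition above) =====
theorem solve_spec : Claim_equal_solve := by
  intro part data _ _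
  exact solve_main part data
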